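-- pv_equiv track=rewrite | github.com/MockaWolke/aoc | 2022_old/18_p2.py | there_is_encomppasing_elements_in_set
-- ===== SOURCE A (Python) =====
-- def there_is_encomppasing_elements_in_set(s:dict,key:tuple,val):
--
--     if key not in s:
--         return True
--
--     smaller = False
--     bigger = False
--     for i in s[key]:
--         if i<val:
--             smaller = True
--         if i > val:
--             bigger = True
--
--         if bigger and smaller:
--             return False
--
--     return True
-- ===== SOURCE B (Python) =====
-- def there_is_encomppasing_elements_in_set(s: dict, key: tuple, val):
--     if key not in s:
--         return True
--     vals = s[key]
--     if not vals:
--         return True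
--     return not (min(vals) < val < max(vals))
-- ===== Notes on version B (the rewrite author's own statement) =====
-- stated objective: simpler
-- what changed: Replaces the short-circuiting two-flag scan with two aggregates: compute min and max of the collection once and decide via the chained comparison not (min < val < max).
import Mathlib
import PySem

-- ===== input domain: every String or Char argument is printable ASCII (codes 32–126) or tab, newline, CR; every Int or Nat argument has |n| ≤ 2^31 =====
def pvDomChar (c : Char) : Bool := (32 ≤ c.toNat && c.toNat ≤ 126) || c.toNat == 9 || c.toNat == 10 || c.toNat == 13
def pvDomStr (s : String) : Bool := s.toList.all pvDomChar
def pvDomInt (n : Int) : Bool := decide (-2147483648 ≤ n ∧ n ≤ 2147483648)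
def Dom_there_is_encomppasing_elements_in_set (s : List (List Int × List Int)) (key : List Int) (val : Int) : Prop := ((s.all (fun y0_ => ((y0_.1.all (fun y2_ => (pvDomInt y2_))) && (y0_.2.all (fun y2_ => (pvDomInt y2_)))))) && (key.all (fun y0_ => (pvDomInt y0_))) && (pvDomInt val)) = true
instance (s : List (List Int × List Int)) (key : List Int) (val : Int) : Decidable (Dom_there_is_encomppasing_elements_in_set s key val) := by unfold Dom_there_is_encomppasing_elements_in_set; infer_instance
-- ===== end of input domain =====

-- B replaces A's short-circuiting two-flag scan by two aggregates (min and max) and a chained comparison; same O(n) cost, simpler.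

-- ===== PORT A =====
-- the for-loop of A, with the two flags as accumulators, early return false when both are set
def pvLoopA (val : Int) (vals : List Int) (smaller bigger : Bool) : Bool :=
  match vals with
  | [] => true
  | i :: t =>
    let smaller := if i < val then true else smaller
    let bigger := if i > val then true else bigger
    if bigger && smaller then false else pvLoopA val t smaller bigger

def there_is_encomppasing_elements_in_set (s : List (List Int × List Int)) (key : List Int) (val : Int) : Bool :=
  if (PySem.Dict.mk s).contains key = false then true
  else
    match (PySem.Dict.mk s).get? key with
    | none => true
    | some vals => pvLoopA val vals false false

-- ===== PORT B =====
def there_is_encomppasing_elements_in_set_alt (s : List (List Int × List Int)) (key : List Int) (val : Int) : Bool :=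
  match (PySem.Dict.mk s).get? key with
  | none => true
  | some vals =>
    if vals = [] then true
    else
      match PySem.List.min? vals (fun x => x), PySem.List.max? vals (fun x => x) with
      | some m, some M => !(decide (m < val) && decide (val < M))
      | _, _ => true

-- ===== PRECONDITION & SPEC =====
def Spec_there_is_encomppasing_elements_in_set (s : List (List Int × List Int)) (key : List Int) (val : Int) (out : Bool) : Prop := out = there_is_encomppasing_elements_in_set_alt s key val
instance (s : List (List Int × List Int)) (key : List Int) (val : Int) (out : Bool) : Decidable (Spec_there_is_encomppasing_elements_in_set s key val out) := by unfold Spec_there_is_encomppasing_elements_in_set; infer_instance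

-- ===== CLAIM (what is proved, stated in full; the proofs are below) =====
def Claim_equal_there_is_encomppasing_elements_in_set : Prop := ∀ (s : List (List Int × List Int)) (key : List Int) (val : Int), Dom_there_is_encomppasing_elements_in_set s key val → Spec_there_is_encomppasing_elements_in_set s key val (there_is_encomppasing_elements_in_set s key val)

-- ===== LEMMAS AND PROOFS =====
theorem pvLoopA_eq (val : Int) : ∀ (vals : List Int) (sm bg : Bool), (sm && bg) = false →
    pvLoopA val vals sm bg
      = !((sm || vals.any (fun i => decide (i < val))) && (bg || vals.any (fun i => decide (val < i)))) := by
  intro vals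
  induction vals with
  | nil => intro sm bg h; cases sm <;> cases bg <;> simp_all [pvLoopA]
  | cons i t ih =>
    intro sm bg h
    simp only [pvLoopA, List.any_cons]
    by_cases h1 : i < val <;> by_cases h2 : val < i
    · omega
    · simp only [if_pos h1, if_neg h2]
      by_cases hb : bg = true
      · simp [hb, h1, h2]
      · simp only [Bool.not_eq_true] at hb; subst hb
        rw [ih _ _ (by simp)]
        simp [h1, h2]
    · simp only [if_neg h1, if_pos h2]
      by_cases hs : sm = true
      · simp [hs, h1, h2]
      · simp only [Bool.not_eq_true] at hs; subst hs
        rw [ih _ _ (by simp)]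
        simp [h1, h2]
    · simp only [if_neg h1, if_neg h2]
      rw [ih _ _ h]
      simp [h1, h2]
      exact fun _ => by cases sm <;> simp_all

theorem min_lt_iff_any (val : Int) (vals : List Int) (m : Int)
    (hm : PySem.List.min? vals (fun x => x) = some m) :
    decide (m < val) = vals.any (fun i => decide (i < val)) := by
  have hmem := PySem.List.min?_mem hm
  have hmin := PySem.List.min?_isMin hm
  by_cases h : m < val
  · simp only [h, decide_true]
    exact Eq.symm (List.any_eq_true.mpr ⟨m, hmem, by simpa using h⟩)
  · simp only [h, decide_false]
    symm; rw [List.any_eq_false]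
    intro x hx
    have := hmin x hx
    simp only [decide_eq_true_eq] at *
    omega

theorem max_gt_iff_any (val : Int) (vals : List Int) (M : Int)
    (hM : PySem.List.max? vals (fun x => x) = some M) :
    decide (val < M) = vals.any (fun i => decide (val < i)) := by
  have hmem := PySem.List.max?_mem hM
  have hmax := PySem.List.max?_isMax hM
  by_cases h : val < M
  · simp only [h, decide_true]
    exact Eq.symm (List.any_eq_true.mpr ⟨M, hmem, by simpa using h⟩)
  · simp only [h, decide_false]
    symm; rw [List.any_eq_false]
    intro x hx
    have := hmax x hx
    simp only [decide_eq_true_eq] at *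
    omega

-- the loop body of A equals B's min/max check, for any looked-up value
theorem pvBranch_eq (val : Int) (o : Option (List Int)) :
    (match o with
      | none => true
      | some vals => pvLoopA val vals false false)
    = (match o with
      | none => true
      | some vals =>
        if vals = [] then true
        else
          match PySem.List.min? vals (fun x => x), PySem.List.max? vals (fun x => x) with
          | some m, some M => !(decide (m < val) && decide (val < M))
          | _, _ => true) := by
  cases o with
  | none => rfl
  | some vals =>
    cases vals with
    | nil => simp [pvLoopA]
    | cons a t =>
      have hne : (a :: t : List Int) ≠ [] := by simp
      obtain ⟨m, hm⟩ := Option.ne_none_iff_exists'.mp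
        (by rw [Ne, PySem.List.min?_eq_none_iff]; exact hne :
          PySem.List.min? (a :: t) (fun x => x) ≠ none)
      obtain ⟨M, hM⟩ := Option.ne_none_iff_exists'.mp
        (by rw [Ne, PySem.List.max?_eq_none_iff]; exact hne :
          PySem.List.max? (a :: t) (fun x => x) ≠ none)
      show pvLoopA val (a :: t) false false =
        (if (a :: t : List Int) = [] then true
         else
           match PySem.List.min? (a :: t) (fun x => x), PySem.List.max? (a :: t) (fun x => x) with
           | some m, some M => !(decide (m < val) && decide (val < M))
           | _, _ => true)
      rw [if_neg hne, hm, hM, pvLoopA_eq val (a :: t) false false rfl]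
      show _ = !(decide (m < val) && decide (val < M))
      rw [min_lt_iff_any val _ m hm, max_gt_iff_any val _ M hM]
      simp

-- ===== VERDICT (by name: the statement is the Claim_ definition above) =====
theorem there_is_encomppasing_elements_in_set_spec : Claim_equal_there_is_encomppasing_elements_in_set := by
  intro s key val _
  unfold Spec_there_is_encomppasing_elements_in_set
  unfold there_is_encomppasing_elements_in_set there_is_encomppasing_elements_in_set_alt
  split
  · rename_i h
    have hn : (PySem.Dict.mk s).get? key = none := by
      simpa [PySem.Dict.contains, PySem.Dict.get?] using h
    rw [hn]
  · exact pvBranch_eq val ((PySem.Dict.mk s).get? key)
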